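-- pv_equiv track=rewrite | github.com/SreenathSreekrishna/euler | c/test.py | divisors_from_factors
-- ===== SOURCE A (Python) =====
-- def divisors_from_factors(factors):
--     from collections import Counter
--     cnt = Counter(factors)
--     ds = [1]
--     for p,e in cnt.items():
--         cur = []
--         powp = 1
--         for i in range(e+1):
--             for x in ds:
--                 cur.append(x * powp)
--             powp *= p
--         ds = cur
--     return sorted(ds)
-- ===== SOURCE B (Python) =====
-- def divisors_from_factors(factors):
--     from collections import Counter
--     import heapq
--     ds = [1]
--     for p, e in Counter(factors).items():
--         runs = []
--         powp = 1
--         for _ in range(e + 1):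
--             runs.append(sorted(x * powp for x in ds))
--             powp *= p
--         ds = list(heapq.merge(*runs))
--     return ds
-- ===== Notes on version B (the rewrite author's own statement) =====
-- stated objective: alternative
-- what changed: B keeps the divisor list sorted as an invariant throughout: each prime contributes sorted scaled runs that are combined by a k-way heapq.merge, so no final global sort is needed, unlike A which appends unsorted and sorts once at the end.
import Mathlib
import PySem

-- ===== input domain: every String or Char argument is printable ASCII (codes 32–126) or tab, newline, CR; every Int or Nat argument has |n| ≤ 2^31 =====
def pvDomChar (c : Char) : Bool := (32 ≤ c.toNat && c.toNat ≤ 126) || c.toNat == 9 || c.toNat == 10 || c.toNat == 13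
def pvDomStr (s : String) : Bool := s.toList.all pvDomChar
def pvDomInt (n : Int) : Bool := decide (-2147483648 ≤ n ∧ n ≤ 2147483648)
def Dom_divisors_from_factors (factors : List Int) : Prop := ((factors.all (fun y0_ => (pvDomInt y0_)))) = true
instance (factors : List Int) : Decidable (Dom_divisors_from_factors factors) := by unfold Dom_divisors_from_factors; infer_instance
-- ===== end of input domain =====

-- B maintains the divisor list SORTED as a loop invariant (per-prime sorted runs combined by
-- k-way merge) instead of A's unsorted accumulation followed by one final sort; values proved equal.

-- ===== PORT A =====
-- step of A's outer loop: for i in range(e+1): for x in ds: cur.append(x*powp); powp *= p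
def pvStepA (ds : List Int) (pe : Int × Int) : List Int :=
  ((PySem.List.pyRange 0 (pe.2 + 1) 1).foldl
    (fun (st : List Int × Int) _ => (st.1 ++ ds.map (fun x => x * st.2), st.2 * pe.1))
    ([], 1)).1

def divisors_from_factors (factors : List Int) : List Int :=
  let cnt := PySem.Dict.counter factors
  let ds := cnt.items.foldl pvStepA [1]
  PySem.List.sorted ds (fun x => x) false

-- ===== PORT B =====
-- heapq.merge(*runs) on sorted runs of Ints: a stable k-way merge; equal Ints are identical,
-- so it is ported exactly as a left fold of binary List.merge over the runs.
def pvMerge2 (a b : List Int) : List Int := a.merge b (fun x y => decide (x ≤ y))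

def pvKMerge (runs : List (List Int)) : List Int := runs.foldl pvMerge2 []

-- step of B's outer loop: build the e+1 sorted scaled runs, then k-way merge them
def pvStepB (ds : List Int) (pe : Int × Int) : List Int :=
  pvKMerge (((PySem.List.pyRange 0 (pe.2 + 1) 1).foldl
    (fun (st : List (List Int) × Int) _ =>
      (st.1 ++ [PySem.List.sorted (ds.map (fun x => x * st.2)) (fun x => x) false], st.2 * pe.1))
    ([], 1)).1)

def divisors_from_factors_alt (factors : List Int) : List Int :=
  (PySem.Dict.counter factors).items.foldl pvStepB [1]

-- ===== PRECONDITION & SPEC =====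
def Spec_divisors_from_factors (factors : List Int) (out : List Int) : Prop := out = divisors_from_factors_alt factors
instance (factors : List Int) (out : List Int) : Decidable (Spec_divisors_from_factors factors out) := by unfold Spec_divisors_from_factors; infer_instance

-- ===== CLAIM (what is proved, stated in full; the proofs are below) =====
def Claim_equal_divisors_from_factors : Prop := ∀ (factors : List Int), Dom_divisors_from_factors factors → Spec_divisors_from_factors factors (divisors_from_factors factors)

-- ===== LEMMAS AND PROOFS =====

def pvPowList (p e : Int) : List Int :=
  (PySem.List.pyRange 0 (e + 1) 1).map (fun i => p ^ i.toNat)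

-- A's inner loop, unrolled
theorem pvInnerA (ds : List Int) (p : Int) (n : Nat) (cur : List Int) (powp : Int) :
    (List.range n).foldl
      (fun (st : List Int × Int) (_ : Nat) => (st.1 ++ ds.map (fun x => x * st.2), st.2 * p))
      (cur, powp)
    = (cur ++ (List.range n).flatMap (fun i => ds.map (fun x => x * (powp * p ^ i))),
       powp * p ^ n) := by
  induction n generalizing cur powp with
  | zero => simp
  | succ n ih =>
    rw [List.range_succ, List.foldl_append, ih]
    simp only [List.foldl_cons, List.foldl_nil, List.flatMap_append, List.flatMap_cons,
      List.flatMap_nil, List.append_nil, List.append_assoc, pow_succ]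
    rw [mul_assoc]

theorem pvStepA_eq (ds : List Int) (p e : Int) :
    pvStepA ds (p, e) = (pvPowList p e).flatMap (fun q => ds.map (fun x => x * q)) := by
  unfold pvStepA pvPowList
  rw [PySem.List.pyRange_one]
  rw [List.foldl_map, pvInnerA ds p ((e + 1 - 0).toNat) [] 1]
  simp [List.flatMap_map]

-- B's inner loop, unrolled
theorem pvInnerB (ds : List Int) (p : Int) (n : Nat) (runs : List (List Int)) (powp : Int) :
    (List.range n).foldl
      (fun (st : List (List Int) × Int) (_ : Nat) =>
        (st.1 ++ [PySem.List.sorted (ds.map (fun x => x * st.2)) (fun x => x) false], st.2 * p))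
      (runs, powp)
    = (runs ++ (List.range n).map
        (fun i => PySem.List.sorted (ds.map (fun x => x * (powp * p ^ i))) (fun x => x) false),
       powp * p ^ n) := by
  induction n generalizing runs powp with
  | zero => simp
  | succ n ih =>
    rw [List.range_succ, List.foldl_append, ih]
    simp only [List.foldl_cons, List.foldl_nil, List.map_append, List.map_cons, List.map_nil,
      List.append_assoc, pow_succ]
    rw [mul_assoc]

theorem pvStepB_eq (ds : List Int) (p e : Int) :
    pvStepB ds (p, e)
      = pvKMerge ((pvPowList p e).map
          (fun q => PySem.List.sorted (ds.map (fun x => x * q)) (fun x => x) false)) := by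
  unfold pvStepB pvPowList
  rw [PySem.List.pyRange_one]
  rw [List.foldl_map, pvInnerB ds p ((e + 1 - 0).toNat) [] 1]
  simp only [List.nil_append, one_mul, List.map_map]
  congr 1
  apply List.map_congr_left
  intro i _
  simp

-- k-way merge: permutation of the concatenation
theorem pvKMerge_fold_perm (runs : List (List Int)) (acc : List Int) :
    (runs.foldl pvMerge2 acc).Perm (acc ++ runs.flatten) := by
  induction runs generalizing acc with
  | nil => simp
  | cons r rest ih =>
    simp only [List.foldl_cons, List.flatten_cons]
    refine (ih _).trans ?_
    simpa [List.append_assoc] using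
      (List.merge_perm_append (fun x y => decide (x ≤ y)) (xs := acc) (ys := r)).append_right
        rest.flatten

theorem pvKMerge_perm (runs : List (List Int)) : (pvKMerge runs).Perm runs.flatten := by
  simpa using pvKMerge_fold_perm runs []

-- k-way merge: sorted output from sorted runs
theorem pvMerge2_pairwise {a b : List Int} (ha : a.Pairwise (· ≤ ·)) (hb : b.Pairwise (· ≤ ·)) :
    (pvMerge2 a b).Pairwise (· ≤ ·) := by
  exact List.Pairwise.merge ha hb

theorem pvKMerge_fold_pairwise (runs : List (List Int)) (acc : List Int)
    (hacc : acc.Pairwise (· ≤ ·)) (h : ∀ r ∈ runs, r.Pairwise (· ≤ ·)) :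
    (runs.foldl pvMerge2 acc).Pairwise (· ≤ ·) := by
  induction runs generalizing acc with
  | nil => exact hacc
  | cons r rest ih =>
    exact ih _ (pvMerge2_pairwise hacc (h r (by simp))) (fun x hx => h x (by simp [hx]))

-- step invariant: pvStepB preserves "sorted permutation of A's state"
theorem pvStep_inv (ds' ds : List Int) (pe : Int × Int)
    (hperm : ds'.Perm ds) :
    (pvStepB ds' pe).Perm (pvStepA ds pe) ∧ (pvStepB ds' pe).Pairwise (· ≤ ·) := by
  obtain ⟨p, e⟩ := pe
  rw [pvStepB_eq, pvStepA_eq]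
  constructor
  · refine (pvKMerge_perm _).trans ?_
    rw [← List.flatMap_def]
    refine List.Perm.flatMap_left _ ?_
    intro q _
    exact (PySem.List.sorted_perm _ _ _).trans (hperm.map _)
  · refine pvKMerge_fold_pairwise _ _ (by simp) ?_
    intro r hr
    simp only [List.mem_map] at hr
    obtain ⟨q, _, rfl⟩ := hr
    simpa using PySem.List.sorted_pairwise (ds'.map (fun x => x * q)) (fun x => x)

-- main loop invariant
theorem pvLoop (l : List (Int × Int)) (ds' ds : List Int)
    (hperm : ds'.Perm ds) (hsorted : ds'.Pairwise (· ≤ ·)) :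
    (l.foldl pvStepB ds').Perm (l.foldl pvStepA ds) ∧
      (l.foldl pvStepB ds').Pairwise (· ≤ ·) := by
  induction l generalizing ds' ds with
  | nil => exact ⟨hperm, hsorted⟩
  | cons pe rest ih =>
    obtain ⟨h1, h2⟩ := pvStep_inv ds' ds pe hperm
    simpa using ih (pvStepB ds' pe) (pvStepA ds pe) h1 h2

-- ===== VERDICT (by name: the statement is the Claim_ definition above) =====
theorem divisors_from_factors_spec : Claim_equal_divisors_from_factors := by
  intro factors _
  unfold Spec_divisors_from_factors divisors_from_factors divisors_from_factors_alt
  obtain ⟨h1, h2⟩ := pvLoop (PySem.Dict.counter factors).items [1] [1] (List.Perm.refl _) (by simp)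
  exact PySem.List.sorted_id_eq_of_perm_of_pairwise _ _ h1 h2
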